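-- pv_equiv track=rewrite | github.com/Alexyskoutnev/DeepRRT | dataset.py | _check_goal_start
-- ===== SOURCE A (Python) =====
-- def _check_goal_start(center, height, length, start, goal):
--     for i in range(0, height):
--         for j in range(0, length):
--             if center[0] - (height // 2) + i == start[0] and center[1] - (length // 2) + j == start[1]:
--                 return False
--             if center[0] - (height // 2) + i == goal[0] and center[1] - (length // 2) + j == goal[1]:
--                 return False
--     return True
-- ===== SOURCE B (Python) =====
-- def _check_goal_start(center, height, length, start, goal):
--     # O(1) bounds check: start/goal are blocked iff they fall inside the
--     # height x length rectangle anchored at center - (height//2, length//2).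
--     if height <= 0 or length <= 0:
--         return True
--     r0 = center[0] - height // 2
--     c0 = center[1] - length // 2
--
--     def inside(p):
--         return r0 <= p[0] < r0 + height and c0 <= p[1] < c0 + length
--
--     return not (inside(start) or inside(goal))
-- ===== Notes on version B (the rewrite author's own statement) =====
-- stated objective: faster
-- what changed: Replaces the nested O(height*length) scan over every cell of the rectangle with a direct O(1) interval bounds check of the start and goal coordinates.
-- outside the precondition, e.g. on _check_goal_start([0], 1, 1, [5], [7]): A returns True, B raises IndexError
import Mathlib
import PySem

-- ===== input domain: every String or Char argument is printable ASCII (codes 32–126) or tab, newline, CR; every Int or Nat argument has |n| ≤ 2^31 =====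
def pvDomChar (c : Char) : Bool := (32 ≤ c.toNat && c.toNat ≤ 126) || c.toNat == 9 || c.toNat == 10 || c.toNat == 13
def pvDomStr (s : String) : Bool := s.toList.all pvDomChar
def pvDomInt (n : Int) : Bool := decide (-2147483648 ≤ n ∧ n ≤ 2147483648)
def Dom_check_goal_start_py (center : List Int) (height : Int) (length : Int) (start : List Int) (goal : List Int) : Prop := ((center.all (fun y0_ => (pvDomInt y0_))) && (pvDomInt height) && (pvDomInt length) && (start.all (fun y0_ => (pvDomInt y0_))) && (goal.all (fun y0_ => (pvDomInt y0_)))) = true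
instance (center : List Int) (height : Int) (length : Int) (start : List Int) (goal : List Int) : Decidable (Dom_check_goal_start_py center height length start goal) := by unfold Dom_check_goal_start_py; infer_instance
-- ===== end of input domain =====

-- B replaces A's O(height*length) cell-by-cell scan with an O(1) bounds check of the
-- start and goal coordinates against the rectangle's coordinate intervals.

-- ===== PORT A =====
-- inner 'for j in range(0, length)' with its two early returns (some false = 'return False')
def pvInnerA (center : List Int) (height : Int) (length : Int) (start : List Int) (goal : List Int) (i : Int) : List Int → Option Bool
  | [] => none
  | j :: js =>
    if PySem.List.pyGetD center 0 0 - PySem.Int.floordiv height 2 + i = PySem.List.pyGetD start 0 0 ∧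
       PySem.List.pyGetD center 1 0 - PySem.Int.floordiv length 2 + j = PySem.List.pyGetD start 1 0 then
      some false
    else if PySem.List.pyGetD center 0 0 - PySem.Int.floordiv height 2 + i = PySem.List.pyGetD goal 0 0 ∧
            PySem.List.pyGetD center 1 0 - PySem.Int.floordiv length 2 + j = PySem.List.pyGetD goal 1 0 then
      some false
    else pvInnerA center height length start goal i js

-- outer 'for i in range(0, height)'
def pvOuterA (center : List Int) (height : Int) (length : Int) (start : List Int) (goal : List Int) : List Int → Option Bool
  | [] => none
  | i :: is_ =>
    match pvInnerA center height length start goal i (PySem.List.pyRange 0 length 1) with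
    | some b => some b
    | none => pvOuterA center height length start goal is_

def check_goal_start_py (center : List Int) (height : Int) (length : Int) (start : List Int) (goal : List Int) : Bool :=
  (pvOuterA center height length start goal (PySem.List.pyRange 0 height 1)).getD true

-- ===== PORT B =====
def check_goal_start_py_alt (center : List Int) (height : Int) (length : Int) (start : List Int) (goal : List Int) : Bool :=
  if height ≤ 0 ∨ length ≤ 0 then true
  else
    let r0 := PySem.List.pyGetD center 0 0 - PySem.Int.floordiv height 2
    let c0 := PySem.List.pyGetD center 1 0 - PySem.Int.floordiv length 2
    let inside : List Int → Bool := fun p =>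
      decide (r0 ≤ PySem.List.pyGetD p 0 0 ∧ PySem.List.pyGetD p 0 0 < r0 + height ∧
              c0 ≤ PySem.List.pyGetD p 1 0 ∧ PySem.List.pyGetD p 1 0 < c0 + length)
    !(inside start || inside goal)

-- ===== PRECONDITION & SPEC =====
-- Pre_ excludes inputs whose coordinate lists have fewer than 2 entries while the rectangle is
-- non-empty: there A either raises IndexError or returns True only by an accidental
-- short-circuit before touching the missing index, and B raises IndexError.
def Pre_check_goal_start_py (center : List Int) (height : Int) (length : Int) (start : List Int) (goal : List Int) : Prop :=
  height ≤ 0 ∨ length ≤ 0 ∨ (2 ≤ center.length ∧ 2 ≤ start.length ∧ 2 ≤ goal.length)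
instance (center : List Int) (height : Int) (length : Int) (start : List Int) (goal : List Int) : Decidable (Pre_check_goal_start_py center height length start goal) := by unfold Pre_check_goal_start_py; infer_instance

def pvWitness_check_goal_start_py : List Int × Int × Int × List Int × List Int := ([0, 0], 3, 3, [5, 5], [1, 1])

def Spec_check_goal_start_py (center : List Int) (height : Int) (length : Int) (start : List Int) (goal : List Int) (out : Bool) : Prop := out = check_goal_start_py_alt center height length start goal
instance (center : List Int) (height : Int) (length : Int) (start : List Int) (goal : List Int) (out : Bool) : Decidable (Spec_check_goal_start_py center height length start goal out) := by unfold Spec_check_goal_start_py; infer_instance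

-- ===== CLAIM (what is proved, stated in full; the proofs are below) =====
def Claim_equal_check_goal_start_py : Prop := ∀ (center : List Int) (height : Int) (length : Int) (start : List Int) (goal : List Int), Dom_check_goal_start_py center height length start goal → Pre_check_goal_start_py center height length start goal → Spec_check_goal_start_py center height length start goal (check_goal_start_py center height length start goal)

-- ===== LEMMAS AND PROOFS =====

theorem pvInnerA_eq_any (center : List Int) (height : Int) (length : Int) (start : List Int) (goal : List Int) (i : Int) (js : List Int) :
    pvInnerA center height length start goal i js =
      (if js.any (fun j =>
          decide ((PySem.List.pyGetD center 0 0 - PySem.Int.floordiv height 2 + i = PySem.List.pyGetD start 0 0 ∧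
                   PySem.List.pyGetD center 1 0 - PySem.Int.floordiv length 2 + j = PySem.List.pyGetD start 1 0) ∨
                  (PySem.List.pyGetD center 0 0 - PySem.Int.floordiv height 2 + i = PySem.List.pyGetD goal 0 0 ∧
                   PySem.List.pyGetD center 1 0 - PySem.Int.floordiv length 2 + j = PySem.List.pyGetD goal 1 0)))
        then some false else none) := by
  induction js with
  | nil => simp only [pvInnerA, List.any_nil, Bool.false_eq_true, if_false]
  | cons j js ih =>
    by_cases h1 : (PySem.List.pyGetD center 0 0 - PySem.Int.floordiv height 2 + i = PySem.List.pyGetD start 0 0 ∧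
                   PySem.List.pyGetD center 1 0 - PySem.Int.floordiv length 2 + j = PySem.List.pyGetD start 1 0)
    · simp only [pvInnerA, if_pos h1, List.any_cons, decide_eq_true (Or.inl h1), Bool.true_or, if_true]
    · by_cases h2 : (PySem.List.pyGetD center 0 0 - PySem.Int.floordiv height 2 + i = PySem.List.pyGetD goal 0 0 ∧
                     PySem.List.pyGetD center 1 0 - PySem.Int.floordiv length 2 + j = PySem.List.pyGetD goal 1 0)
      · simp only [pvInnerA, if_neg h1, if_pos h2, List.any_cons, decide_eq_true (Or.inr h2), Bool.true_or, if_true]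
      · simp only [pvInnerA, if_neg h1, if_neg h2, List.any_cons, decide_eq_false (not_or.mpr ⟨h1, h2⟩), Bool.false_or]
        exact ih

theorem pvOuterA_eq_any (center : List Int) (height : Int) (length : Int) (start : List Int) (goal : List Int) (is_ : List Int) :
    pvOuterA center height length start goal is_ =
      (if is_.any (fun i => (PySem.List.pyRange 0 length 1).any (fun j =>
          decide ((PySem.List.pyGetD center 0 0 - PySem.Int.floordiv height 2 + i = PySem.List.pyGetD start 0 0 ∧
                   PySem.List.pyGetD center 1 0 - PySem.Int.floordiv length 2 + j = PySem.List.pyGetD start 1 0) ∨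
                  (PySem.List.pyGetD center 0 0 - PySem.Int.floordiv height 2 + i = PySem.List.pyGetD goal 0 0 ∧
                   PySem.List.pyGetD center 1 0 - PySem.Int.floordiv length 2 + j = PySem.List.pyGetD goal 1 0))))
        then some false else none) := by
  induction is_ with
  | nil => simp only [pvOuterA, List.any_nil, Bool.false_eq_true, if_false]
  | cons i is_ ih =>
    simp only [pvOuterA, List.any_cons]
    by_cases h : (PySem.List.pyRange 0 length 1).any (fun j =>
          decide ((PySem.List.pyGetD center 0 0 - PySem.Int.floordiv height 2 + i = PySem.List.pyGetD start 0 0 ∧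
                   PySem.List.pyGetD center 1 0 - PySem.Int.floordiv length 2 + j = PySem.List.pyGetD start 1 0) ∨
                  (PySem.List.pyGetD center 0 0 - PySem.Int.floordiv height 2 + i = PySem.List.pyGetD goal 0 0 ∧
                   PySem.List.pyGetD center 1 0 - PySem.Int.floordiv length 2 + j = PySem.List.pyGetD goal 1 0))) = true
    · simp only [pvInnerA_eq_any, h, Bool.true_or, if_true]
    · rw [Bool.not_eq_true] at h
      simp only [pvInnerA_eq_any, h, Bool.false_eq_true, if_false, Bool.false_or]
      exact ih

-- ===== VERDICT (by name: the statement is the Claim_ definition above) =====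
theorem check_goal_start_py_spec : Claim_equal_check_goal_start_py := by
  intro center height length start goal _hd hpre
  unfold Spec_check_goal_start_py check_goal_start_py check_goal_start_py_alt
  rw [pvOuterA_eq_any]
  by_cases hdeg : height ≤ 0 ∨ length ≤ 0
  · rw [if_pos hdeg]
    rcases hdeg with hh | hl
    · rw [PySem.List.pyRange_one_eq_nil (by omega)]
      simp
    · have hnil : PySem.List.pyRange 0 length 1 = [] := PySem.List.pyRange_one_eq_nil (by omega)
      rw [hnil]
      simp
  · rw [if_neg hdeg]
    obtain ⟨hc, hs, hg⟩ : 2 ≤ center.length ∧ 2 ≤ start.length ∧ 2 ≤ goal.length := by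
      rcases hpre with h | h | h
      · omega
      · omega
      · exact h
    have key : ((PySem.List.pyRange 0 height 1).any (fun i => (PySem.List.pyRange 0 length 1).any (fun j =>
          decide ((PySem.List.pyGetD center 0 0 - PySem.Int.floordiv height 2 + i = PySem.List.pyGetD start 0 0 ∧
                   PySem.List.pyGetD center 1 0 - PySem.Int.floordiv length 2 + j = PySem.List.pyGetD start 1 0) ∨
                  (PySem.List.pyGetD center 0 0 - PySem.Int.floordiv height 2 + i = PySem.List.pyGetD goal 0 0 ∧
                   PySem.List.pyGetD center 1 0 - PySem.Int.floordiv length 2 + j = PySem.List.pyGetD goal 1 0)))))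
        = ((decide (PySem.List.pyGetD center 0 0 - PySem.Int.floordiv height 2 ≤ PySem.List.pyGetD start 0 0 ∧
              PySem.List.pyGetD start 0 0 < PySem.List.pyGetD center 0 0 - PySem.Int.floordiv height 2 + height ∧
              PySem.List.pyGetD center 1 0 - PySem.Int.floordiv length 2 ≤ PySem.List.pyGetD start 1 0 ∧
              PySem.List.pyGetD start 1 0 < PySem.List.pyGetD center 1 0 - PySem.Int.floordiv length 2 + length)) ||
           (decide (PySem.List.pyGetD center 0 0 - PySem.Int.floordiv height 2 ≤ PySem.List.pyGetD goal 0 0 ∧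
              PySem.List.pyGetD goal 0 0 < PySem.List.pyGetD center 0 0 - PySem.Int.floordiv height 2 + height ∧
              PySem.List.pyGetD center 1 0 - PySem.Int.floordiv length 2 ≤ PySem.List.pyGetD goal 1 0 ∧
              PySem.List.pyGetD goal 1 0 < PySem.List.pyGetD center 1 0 - PySem.Int.floordiv length 2 + length))) := by
      rw [Bool.eq_iff_iff]
      simp only [List.any_eq_true, PySem.List.mem_pyRange_one, decide_eq_true_eq, Bool.or_eq_true]
      constructor
      · rintro ⟨i, hi, j, hj, ⟨e1, e2⟩ | ⟨e1, e2⟩⟩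
        · left; exact ⟨by omega, by omega, by omega, by omega⟩
        · right; exact ⟨by omega, by omega, by omega, by omega⟩
      · rintro (⟨a1, a2, a3, a4⟩ | ⟨a1, a2, a3, a4⟩)
        · exact ⟨PySem.List.pyGetD start 0 0 - (PySem.List.pyGetD center 0 0 - PySem.Int.floordiv height 2),
                 ⟨by omega, by omega⟩,
                 PySem.List.pyGetD start 1 0 - (PySem.List.pyGetD center 1 0 - PySem.Int.floordiv length 2),
                 ⟨by omega, by omega⟩, Or.inl ⟨by omega, by omega⟩⟩
        · exact ⟨PySem.List.pyGetD goal 0 0 - (PySem.List.pyGetD center 0 0 - PySem.Int.floordiv height 2),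
                 ⟨by omega, by omega⟩,
                 PySem.List.pyGetD goal 1 0 - (PySem.List.pyGetD center 1 0 - PySem.Int.floordiv length 2),
                 ⟨by omega, by omega⟩, Or.inr ⟨by omega, by omega⟩⟩
    rw [key]
    have gen : ∀ b : Bool, ((if b = true then (some false : Option Bool) else none).getD true) = !b := by
      intro b; cases b <;> rfl
    exact gen _
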